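-- pv_equiv track=rewrite | github.com/kevinabowman71/media-dashboard | app.py | narrative_timeline
-- ===== SOURCE A (Python) =====
-- def narrative_timeline(cluster):
--
--     timeline = {}
--
--     for article in cluster:
--
--         bias = article.get("bias")
--         time = article.get("published")
--
--         if not bias or not time:
--             continue
--
--         if bias not in timeline or time < timeline[bias]:
--             timeline[bias] = time
--
--     return timeline
-- ===== SOURCE B (Python) =====
-- def narrative_timeline(cluster):
--     groups = {}
--     for article in cluster:
--         bias = article.get("bias")
--         time = article.get("published")
--         if bias and time:
--             groups.setdefault(bias, []).append(time)
--     return {bias: min(times) for bias, times in groups.items()}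
-- ===== Notes on version B (the rewrite author's own statement) =====
-- stated objective: alternative
-- what changed: Replaces the running-minimum update inside the loop by a group-then-reduce shape: one pass collects all published times per bias into lists, then a dict comprehension takes min() of each list.
import Mathlib
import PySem

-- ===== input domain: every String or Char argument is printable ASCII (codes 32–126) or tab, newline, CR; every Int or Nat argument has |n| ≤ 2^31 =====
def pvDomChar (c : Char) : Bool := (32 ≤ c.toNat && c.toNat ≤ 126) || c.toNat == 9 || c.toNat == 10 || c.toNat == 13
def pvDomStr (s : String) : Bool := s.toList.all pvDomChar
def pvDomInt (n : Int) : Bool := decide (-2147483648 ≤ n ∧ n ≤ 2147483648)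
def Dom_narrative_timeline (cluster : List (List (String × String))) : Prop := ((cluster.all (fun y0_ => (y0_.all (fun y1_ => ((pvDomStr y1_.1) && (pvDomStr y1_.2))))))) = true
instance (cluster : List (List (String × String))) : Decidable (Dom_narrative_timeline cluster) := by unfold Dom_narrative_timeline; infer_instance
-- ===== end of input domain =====

-- B replaces A's running-minimum update by a group-then-reduce pass (collect times per bias, then min per group); alternative decomposition, same cost.

-- ===== PORT A =====
def narrative_timeline (cluster : List (List (String × String))) : List (String × String) :=
  (cluster.foldl (fun timeline article =>
    match (PySem.Dict.mk article).get? "bias", (PySem.Dict.mk article).get? "published" with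
    | some bias, some time =>
        if bias = "" ∨ time = "" then timeline
        else if ¬ timeline.contains bias ∨ time < timeline.getD bias "" then
          timeline.insert bias time
        else timeline
    | _, _ => timeline) (PySem.Dict.empty : PySem.Dict String String)).items

-- ===== PORT B =====
def narrative_timeline_alt (cluster : List (List (String × String))) : List (String × String) :=
  let groups := cluster.foldl (fun groups article =>
    match (PySem.Dict.mk article).get? "bias" with
    | none => groups
    | some bias =>
      match (PySem.Dict.mk article).get? "published" with
      | none => groups
      | some time =>
          if bias ≠ "" ∧ time ≠ "" then groups.modify bias [] (· ++ [time]) else groups) (PySem.Dict.empty : PySem.Dict String (List String))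
  groups.items.map (fun p => (p.1, (PySem.List.min? p.2 (fun x => x)).getD ""))

-- ===== PRECONDITION & SPEC =====
def Spec_narrative_timeline (cluster : List (List (String × String))) (out : List (String × String)) : Prop := out = narrative_timeline_alt cluster
instance (cluster : List (List (String × String))) (out : List (String × String)) : Decidable (Spec_narrative_timeline cluster out) := by unfold Spec_narrative_timeline; infer_instance

-- ===== CLAIM (what is proved, stated in full; the proofs are below) =====
def Claim_equal_narrative_timeline : Prop := ∀ (cluster : List (List (String × String))), Dom_narrative_timeline cluster → Spec_narrative_timeline cluster (narrative_timeline cluster)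

-- ===== LEMMAS AND PROOFS =====

-- abbreviations for the two loop bodies (exactly the lambdas in the ports)
def pvStepA (timeline : PySem.Dict String String) (article : List (String × String)) : PySem.Dict String String :=
  match (PySem.Dict.mk article).get? "bias", (PySem.Dict.mk article).get? "published" with
  | some bias, some time =>
      if bias = "" ∨ time = "" then timeline
      else if ¬ timeline.contains bias ∨ time < timeline.getD bias "" then
        timeline.insert bias time
      else timeline
  | _, _ => timeline

def pvStepB (groups : PySem.Dict String (List String)) (article : List (String × String)) : PySem.Dict String (List String) :=
  match (PySem.Dict.mk article).get? "bias" with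
  | none => groups
  | some bias =>
    match (PySem.Dict.mk article).get? "published" with
    | none => groups
    | some time =>
        if bias ≠ "" ∧ time ≠ "" then groups.modify bias [] (· ++ [time]) else groups

def pvMin (ts : List String) : String := (PySem.List.min? ts (fun x => x)).getD ""

def pvRel (g : PySem.Dict String (List String)) (d : PySem.Dict String String) : Prop :=
  g.keys.Nodup ∧ (∀ p ∈ g.items, p.2 ≠ []) ∧ d.items = g.items.map (fun p => (p.1, pvMin p.2))

lemma pvKeys_eq {g : PySem.Dict String (List String)} {d : PySem.Dict String String}
    (h : d.items = g.items.map (fun p => (p.1, pvMin p.2))) : d.keys = g.keys := by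
  show d.items.map Prod.fst = g.items.map Prod.fst
  rw [h, List.map_map]
  rfl

lemma pvContains_eq {g : PySem.Dict String (List String)} {d : PySem.Dict String String}
    (h : d.items = g.items.map (fun p => (p.1, pvMin p.2))) (k : String) :
    d.contains k = g.contains k := by
  rw [PySem.Dict.contains_eq_decide_mem_keys, PySem.Dict.contains_eq_decide_mem_keys, pvKeys_eq h]

lemma pvMin_append (ts : List String) (t : String) (m : String)
    (hm : PySem.List.min? ts (fun x => x) = some m) :
    PySem.List.min? (ts ++ [t]) (fun x => x) = some (if t < m then t else m) := by
  simp only [PySem.List.min?, List.foldl_append, List.foldl_cons, List.foldl_nil] at hm ⊢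
  rw [hm]
  by_cases h : t < m <;> simp [h]

lemma pvUnique_of_nodup {g : PySem.Dict String (List String)} (hnd : g.keys.Nodup)
    {b : String} {ts : List String} (hmem : (b, ts) ∈ g.items) :
    ∀ p ∈ g.items, p.1 = b → p = (b, ts) := by
  intro p hp hpb
  obtain ⟨p1, p2⟩ := p
  have h1 : g.get? b = some ts := PySem.Dict.get?_of_mem_items g hmem hnd
  have h2 : g.get? p1 = some p2 := PySem.Dict.get?_of_mem_items g hp hnd
  simp only at hpb
  rw [hpb, h1] at h2
  simp_all

lemma pvStep_rel (g : PySem.Dict String (List String)) (d : PySem.Dict String String)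
    (article : List (String × String)) (h : pvRel g d) : pvRel (pvStepB g article) (pvStepA d article) := by
  obtain ⟨hnd, hne, hitems⟩ := h
  unfold pvStepA pvStepB
  cases hb : (PySem.Dict.mk article).get? "bias" with
  | none => exact ⟨hnd, hne, hitems⟩
  | some bias =>
    cases ht : (PySem.Dict.mk article).get? "published" with
    | none => exact ⟨hnd, hne, hitems⟩
    | some time =>
      simp only
      by_cases hempty : bias = "" ∨ time = ""
      · have : ¬ (bias ≠ "" ∧ time ≠ "") := by tauto
        simp only [if_pos hempty, if_neg this]
        exact ⟨hnd, hne, hitems⟩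
      · have hbt : bias ≠ "" ∧ time ≠ "" := by tauto
        simp only [if_neg hempty, if_pos hbt]
        rw [PySem.Dict.modify]
        by_cases hc : g.contains bias = true
        · -- bias already grouped: overwrite in place on both sides
          have hdc : d.contains bias = true := by rw [pvContains_eq hitems]; exact hc
          obtain ⟨ts, hts⟩ : ∃ ts, g.get? bias = some ts := by
            have h := PySem.Dict.contains_eq_isSome_get? g bias
            rw [hc] at h
            exact Option.isSome_iff_exists.mp h.symm
          have hmem : (bias, ts) ∈ g.items := PySem.Dict.mem_items_of_get?_eq_some g hts
          have htsne : ts ≠ [] := hne _ hmem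
          obtain ⟨m0, hm0⟩ : ∃ m0, PySem.List.min? ts (fun x => x) = some m0 := by
            cases hmin : PySem.List.min? ts (fun x => x) with
            | none => exact absurd ((PySem.List.min?_eq_none_iff ts (fun x => x)).mp hmin) htsne
            | some m0 => exact ⟨m0, rfl⟩
          have hpv : pvMin ts = m0 := by simp [pvMin, hm0]
          have hdnd : d.keys.Nodup := by rw [pvKeys_eq hitems]; exact hnd
          have hdget : d.get? bias = some m0 := by
            refine PySem.Dict.get?_of_mem_items d ?_ hdnd
            rw [hitems, ← hpv]
            exact List.mem_map.mpr ⟨(bias, ts), hmem, rfl⟩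
          have hdgD : d.getD bias "" = m0 := PySem.Dict.getD_of_get?_eq_some d "" hdget
          have hgD : g.getD bias [] = ts := PySem.Dict.getD_of_get?_eq_some g [] hts
          have hgitems : (g.insert bias (g.getD bias [] ++ [time])).items
              = g.items.map (fun p => if p.1 == bias then (bias, ts ++ [time]) else p) := by
            rw [hgD]; exact PySem.Dict.items_insert_of_contains g (ts ++ [time]) hc
          have hmin_app : pvMin (ts ++ [time]) = if time < m0 then time else m0 := by
            simp [pvMin, pvMin_append ts time m0 hm0]
          refine ⟨?_, ?_, ?_⟩
          · rw [PySem.Dict.keys_insert_of_contains g (g.getD bias [] ++ [time]) hc]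
            exact hnd
          · intro p hp
            rw [hgitems] at hp
            obtain ⟨q, hq, hqp⟩ := List.mem_map.mp hp
            by_cases h : q.1 == bias <;> simp [h] at hqp
            · rw [← hqp]; simp
            · rw [← hqp]; exact hne _ hq
          · rw [hgitems, List.map_map]
            by_cases hlt : time < m0
            · simp only [hdc, hdgD, not_true, false_or, if_pos hlt]
              rw [PySem.Dict.items_insert_of_contains d time hdc, hitems, List.map_map]
              refine List.map_congr_left (fun p hp => ?_)
              by_cases h : p.1 == bias
              · have hpb : p = (bias, ts) := pvUnique_of_nodup hnd hmem p hp (eq_of_beq h)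
                simp [Function.comp, hpb, hmin_app, hlt]
              · simp [Function.comp, h]
            · simp only [hdc, hdgD, not_true, false_or, if_neg hlt]
              rw [hitems]
              refine List.map_congr_left (fun p hp => ?_)
              by_cases h : p.1 == bias
              · have hpb : p = (bias, ts) := pvUnique_of_nodup hnd hmem p hp (eq_of_beq h)
                simp [Function.comp, hpb, hmin_app, hlt, hpv]
              · simp [Function.comp, h]
        · -- fresh bias: both sides append
          have hdc : d.contains bias = false := by rw [pvContains_eq hitems]; simpa using hc
          have hgD : g.getD bias [] = [] := PySem.Dict.getD_of_not_contains g [] (by simpa using hc)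
          refine ⟨?_, ?_, ?_⟩
          · rw [PySem.Dict.keys_insert_of_not_contains g (g.getD bias [] ++ [time]) (by simpa using hc)]
            refine List.Nodup.append hnd (List.nodup_singleton _) ?_
            intro a ha hb
            simp at hb
            subst hb
            simp [PySem.Dict.contains_iff_mem_keys] at hc
            exact hc ha
          · intro p hp
            rw [PySem.Dict.items_insert_of_not_contains g (g.getD bias [] ++ [time]) (by simpa using hc)] at hp
            rcases List.mem_append.mp hp with h1 | h1
            · exact hne p h1
            · simp at h1; simp [h1, hgD]
          · have hcond : (¬ d.contains bias = true ∨ time < d.getD bias "") := by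
              left; simp [hdc]
            rw [if_pos hcond,
                PySem.Dict.items_insert_of_not_contains d time hdc,
                PySem.Dict.items_insert_of_not_contains g (g.getD bias [] ++ [time]) (by simpa using hc)]
            simp [hitems, hgD, pvMin, PySem.List.min?]

lemma pvLoop_rel : ∀ (cluster : List (List (String × String)))
    (g : PySem.Dict String (List String)) (d : PySem.Dict String String), pvRel g d →
    pvRel (cluster.foldl pvStepB g) (cluster.foldl pvStepA d) := by
  intro cluster
  induction cluster with
  | nil => intro g d h; exact h
  | cons a rest ih => intro g d h; exact ih _ _ (pvStep_rel g d a h)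

-- ===== VERDICT (by name: the statement is the Claim_ definition above) =====
theorem narrative_timeline_spec : Claim_equal_narrative_timeline := by
  intro cluster _
  show narrative_timeline cluster = narrative_timeline_alt cluster
  have h := pvLoop_rel cluster PySem.Dict.empty PySem.Dict.empty
    ⟨by simp [PySem.Dict.keys_empty], by simp [PySem.Dict.empty], by simp [PySem.Dict.empty]⟩
  exact h.2.2
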